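-- pv_equiv track=rewrite | github.com/rostirolla55/Quadrilatero | add_page_v3.10.py | get_translations_for_nav
-- ===== SOURCE A (Python) =====
-- def get_translations_for_nav(page_title_it):
--     """Genera traduzioni automatiche per i file nav-xx.json."""
--     mapping = {
--         "Basilica": {"en": "Basilica", "es": "Basílica", "fr": "Basilique"},
--         "Chiesa": {"en": "Church", "es": "Iglesia", "fr": "Église"},
--         "Santa": {"en": "Saint", "es": "San", "fr": "Saint"},
--         "Maria": {"en": "Mary", "es": "María", "fr": "Marie"},
--         "Maggiore": {"en": "Major", "es": "Mayor", "fr": "Majeure"},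
--     }
--     translations = {"it": page_title_it}
--     words = page_title_it.split()
--     for lang in ["en", "es", "fr"]:
--         translated_words = [mapping.get(w, {}).get(lang, w) for w in words]
--         translations[lang] = " ".join(translated_words)
--     return translations
-- ===== SOURCE B (Python) =====
-- def get_translations_for_nav(page_title_it):
--     """Genera traduzioni automatiche per i file nav-xx.json."""
--     mapping = {
--         "Basilica": ("Basilica", "Bas\u00edlica", "Basilique"),
--         "Chiesa": ("Church", "Iglesia", "\u00c9glise"),
--         "Santa": ("Saint", "San", "Saint"),
--         "Maria": ("Mary", "Mar\u00eda", "Marie"),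
--         "Maggiore": ("Major", "Mayor", "Majeure"),
--     }
--     en, es, fr = [], [], []
--     for w in page_title_it.split():
--         e, s, f = mapping.get(w, (w, w, w))
--         en.append(e)
--         es.append(s)
--         fr.append(f)
--     return {"it": page_title_it, "en": " ".join(en), "es": " ".join(es), "fr": " ".join(fr)}
-- ===== Notes on version B (the rewrite author's own statement) =====
-- stated objective: simpler
-- what changed: B splits the title once and makes a single pass over the words, keeping three accumulator lists (en/es/fr) filled from a flat word->triple table, instead of A's outer loop over languages that rebuilds the word list translation for each language via nested dict lookups.
import Mathlib
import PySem

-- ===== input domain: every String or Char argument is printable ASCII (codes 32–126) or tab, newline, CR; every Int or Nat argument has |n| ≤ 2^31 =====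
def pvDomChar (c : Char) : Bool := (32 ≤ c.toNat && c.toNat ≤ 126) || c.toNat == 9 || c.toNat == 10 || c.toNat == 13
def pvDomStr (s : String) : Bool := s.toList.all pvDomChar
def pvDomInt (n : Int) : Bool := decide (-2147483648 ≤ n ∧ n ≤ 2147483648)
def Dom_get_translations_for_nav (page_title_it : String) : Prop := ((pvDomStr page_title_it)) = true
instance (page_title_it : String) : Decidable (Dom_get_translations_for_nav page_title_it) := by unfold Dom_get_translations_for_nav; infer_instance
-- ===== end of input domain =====

-- B splits the title once and fills three accumulator lists (en/es/fr) in a single pass over the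
-- words from a flat word->triple table, instead of A's outer loop over languages (objective: simpler).


-- ===== PORT A =====
-- A's nested mapping: word -> {lang -> translation}
def navMapping : PySem.Dict String (PySem.Dict String String) :=
  PySem.Dict.ofList [
    ("Basilica", PySem.Dict.ofList [("en", "Basilica"), ("es", "Basílica"), ("fr", "Basilique")]),
    ("Chiesa",   PySem.Dict.ofList [("en", "Church"),   ("es", "Iglesia"),  ("fr", "Église")]),
    ("Santa",    PySem.Dict.ofList [("en", "Saint"),    ("es", "San"),      ("fr", "Saint")]),
    ("Maria",    PySem.Dict.ofList [("en", "Mary"),     ("es", "María"),    ("fr", "Marie")]),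
    ("Maggiore", PySem.Dict.ofList [("en", "Major"),    ("es", "Mayor"),    ("fr", "Majeure")])]

def get_translations_for_nav (page_title_it : String) : List (String × String) :=
  let translations : PySem.Dict String String := PySem.Dict.ofList [("it", page_title_it)]
  let words := PySem.Str.split₀ page_title_it
  let translations := ["en", "es", "fr"].foldl (fun tr lang =>
    let translated_words := words.map (fun w =>
      PySem.Dict.getD (PySem.Dict.getD navMapping w PySem.Dict.empty) lang w)
    tr.insert lang (PySem.Str.join " " translated_words)) translations
  translations.items

-- ===== PORT B =====
-- B's flat mapping: word -> (en, es, fr)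
def navTriples : PySem.Dict String (String × String × String) :=
  PySem.Dict.ofList [
    ("Basilica", ("Basilica", "Basílica", "Basilique")),
    ("Chiesa",   ("Church",   "Iglesia",  "Église")),
    ("Santa",    ("Saint",    "San",      "Saint")),
    ("Maria",    ("Mary",     "María",    "Marie")),
    ("Maggiore", ("Major",    "Mayor",    "Majeure"))]

def get_translations_for_nav_alt (page_title_it : String) : List (String × String) :=
  let acc := (PySem.Str.split₀ page_title_it).foldl
    (fun (acc : List String × List String × List String) w =>
      let t := PySem.Dict.getD navTriples w (w, w, w)
      (acc.1 ++ [t.1], acc.2.1 ++ [t.2.1], acc.2.2 ++ [t.2.2]))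
    ([], [], [])
  [("it", page_title_it),
   ("en", PySem.Str.join " " acc.1),
   ("es", PySem.Str.join " " acc.2.1),
   ("fr", PySem.Str.join " " acc.2.2)]

-- ===== PRECONDITION & SPEC =====
def Spec_get_translations_for_nav (page_title_it : String) (out : List (String × String)) : Prop := out = get_translations_for_nav_alt page_title_it
instance (page_title_it : String) (out : List (String × String)) : Decidable (Spec_get_translations_for_nav page_title_it out) := by unfold Spec_get_translations_for_nav; infer_instance

-- ===== CLAIM (what is proved, stated in full; the proofs are below) =====
def Claim_equal_get_translations_for_nav : Prop := ∀ (page_title_it : String), Dom_get_translations_for_nav page_title_it → Spec_get_translations_for_nav page_title_it (get_translations_for_nav page_title_it)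

-- ===== LEMMAS AND PROOFS =====

theorem navRow_en (w : String) :
    PySem.Dict.getD (PySem.Dict.getD navMapping w PySem.Dict.empty) "en" w
      = (PySem.Dict.getD navTriples w (w, w, w)).1 := by
  by_cases h1 : w = "Basilica"; · subst h1; rfl
  by_cases h2 : w = "Chiesa"; · subst h2; rfl
  by_cases h3 : w = "Santa"; · subst h3; rfl
  by_cases h4 : w = "Maria"; · subst h4; rfl
  by_cases h5 : w = "Maggiore"; · subst h5; rfl
  simp [navMapping, navTriples, PySem.Dict.ofList, PySem.Dict.update, PySem.Dict.insert,
    PySem.Dict.contains, PySem.Dict.empty, List.foldl, PySem.Dict.getD_eq_get?_getD,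
    Ne.symm h1, Ne.symm h2, Ne.symm h3, Ne.symm h4, Ne.symm h5, PySem.Dict.get?]

theorem navRow_es (w : String) :
    PySem.Dict.getD (PySem.Dict.getD navMapping w PySem.Dict.empty) "es" w
      = (PySem.Dict.getD navTriples w (w, w, w)).2.1 := by
  by_cases h1 : w = "Basilica"; · subst h1; rfl
  by_cases h2 : w = "Chiesa"; · subst h2; rfl
  by_cases h3 : w = "Santa"; · subst h3; rfl
  by_cases h4 : w = "Maria"; · subst h4; rfl
  by_cases h5 : w = "Maggiore"; · subst h5; rfl
  simp [navMapping, navTriples, PySem.Dict.ofList, PySem.Dict.update, PySem.Dict.insert,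
    PySem.Dict.contains, PySem.Dict.empty, List.foldl, PySem.Dict.getD_eq_get?_getD,
    Ne.symm h1, Ne.symm h2, Ne.symm h3, Ne.symm h4, Ne.symm h5, PySem.Dict.get?]

theorem navRow_fr (w : String) :
    PySem.Dict.getD (PySem.Dict.getD navMapping w PySem.Dict.empty) "fr" w
      = (PySem.Dict.getD navTriples w (w, w, w)).2.2 := by
  by_cases h1 : w = "Basilica"; · subst h1; rfl
  by_cases h2 : w = "Chiesa"; · subst h2; rfl
  by_cases h3 : w = "Santa"; · subst h3; rfl
  by_cases h4 : w = "Maria"; · subst h4; rfl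
  by_cases h5 : w = "Maggiore"; · subst h5; rfl
  simp [navMapping, navTriples, PySem.Dict.ofList, PySem.Dict.update, PySem.Dict.insert,
    PySem.Dict.contains, PySem.Dict.empty, List.foldl, PySem.Dict.getD_eq_get?_getD,
    Ne.symm h1, Ne.symm h2, Ne.symm h3, Ne.symm h4, Ne.symm h5, PySem.Dict.get?]

-- B's single pass with three accumulators computes the three per-language word maps.
theorem altFold (ws : List String) (a b c : List String) :
    ws.foldl (fun (acc : List String × List String × List String) w =>
        let t := PySem.Dict.getD navTriples w (w, w, w)
        (acc.1 ++ [t.1], acc.2.1 ++ [t.2.1], acc.2.2 ++ [t.2.2])) (a, b, c)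
      = (a ++ ws.map (fun w => (PySem.Dict.getD navTriples w (w, w, w)).1),
         b ++ ws.map (fun w => (PySem.Dict.getD navTriples w (w, w, w)).2.1),
         c ++ ws.map (fun w => (PySem.Dict.getD navTriples w (w, w, w)).2.2)) := by
  induction ws generalizing a b c with
  | nil => simp
  | cons w ws ih => simp [List.foldl_cons, ih]

-- ===== VERDICT (by name: the statement is the Claim_ definition above) =====
theorem get_translations_for_nav_spec : Claim_equal_get_translations_for_nav := by
  intro t _
  show get_translations_for_nav t = get_translations_for_nav_alt t
  unfold get_translations_for_nav get_translations_for_nav_alt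
  simp only [List.foldl_cons, List.foldl_nil, altFold, List.nil_append,
    navRow_en, navRow_es, navRow_fr]
  rfl
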